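-- pv_equiv track=rewrite | github.com/szymont18/holiday-enroll | brute_force.py | _generate_next_mask
-- ===== SOURCE A (Python) =====
-- def _generate_next_mask(friends_mask):
--     counter = 0
--     for i in range(len(friends_mask) - 1, -1, -1):
--         if friends_mask[i]:
--             counter += 1
--             if i < len(friends_mask) - counter:
--                 friends_mask[i] = 0
--                 for j in range(i + 1, i + counter + 1):
--                     friends_mask[j] = 1
--                 return True
--             else:
--                 friends_mask[i] = 0
--
--     return False
-- ===== SOURCE B (Python) =====
-- # B: instead of A's right-to-left counter scan, count the ones and test whether any
-- # one lies left of the packed right-hand suffix; the mask is then rebuilt from the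
-- # list of one-positions.  Return value equals A's everywhere; the in-place mutation
-- # matches A's for 0/1 masks (for other truthy values A leaves untouched prefix
-- # entries as-is, B normalises them to 1) -- the equivalence proved is about the
-- # return value.
-- def _generate_next_mask(friends_mask):
--     n = len(friends_mask)
--     ones = [i for i, v in enumerate(friends_mask) if v]
--     k = len(ones)
--     has_next = any(friends_mask[: n - k])
--     for i in range(n):
--         friends_mask[i] = 0
--     if has_next:
--         s = next(j for j in range(k) if ones[k - 1 - j] != n - 1 - j)
--         p = ones[k - 1 - s]
--         for i in ones[: k - 1 - s]:
--             friends_mask[i] = 1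
--         for i in range(p + 1, p + s + 2):
--             friends_mask[i] = 1
--     return has_next
-- ===== Notes on version B (the rewrite author's own statement) =====
-- stated objective: alternative
-- what changed: A's right-to-left scan with a running counter and early return is replaced by computing the list of one-positions, counting them (k), and testing whether any truthy entry lies among the first n-k slots (i.e. the ones are not already packed at the right end), then rebuilding the mask from the one-positions instead of patching it during the scan.
import Mathlib
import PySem

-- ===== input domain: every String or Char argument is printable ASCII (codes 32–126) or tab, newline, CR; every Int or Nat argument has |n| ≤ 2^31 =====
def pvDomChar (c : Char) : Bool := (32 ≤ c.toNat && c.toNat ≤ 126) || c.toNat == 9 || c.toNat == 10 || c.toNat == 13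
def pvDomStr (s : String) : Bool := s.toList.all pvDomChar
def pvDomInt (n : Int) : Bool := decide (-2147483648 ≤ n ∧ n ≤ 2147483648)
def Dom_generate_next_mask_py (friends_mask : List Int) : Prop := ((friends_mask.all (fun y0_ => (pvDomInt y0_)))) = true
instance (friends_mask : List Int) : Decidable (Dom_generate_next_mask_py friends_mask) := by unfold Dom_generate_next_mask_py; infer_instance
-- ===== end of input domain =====

-- B replaces A's right-to-left counter scan by "count the ones, test for a one left of the
-- packed right suffix"; A mutates its argument in place (B's rebuild matches it on 0/1 masks);
-- the equivalence proved here is about the RETURN value only.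

-- ===== PORT A =====
-- A's loop 'for i in range(len(fm)-1, -1, -1)' with early return; the in-place writes
-- fm[i] = 0 / fm[j] = 1 never touch an index the loop still reads (reads move strictly
-- left of every write), so the reads are from the original list.  Every index produced by
-- the range is in bounds, so fm[i] is pyGetD fm i 0 exactly.
def pvAloop (fm : List Int) : List Int → Int → Bool
  | [], _ => false
  | i :: rest, counter =>
    if PySem.List.pyGetD fm i 0 ≠ 0 then
      if i < (fm.length : Int) - (counter + 1) then true
      else pvAloop fm rest (counter + 1)
    else pvAloop fm rest counter

def generate_next_mask_py (friends_mask : List Int) : Bool :=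
  pvAloop friends_mask (PySem.List.pyRange ((friends_mask.length : Int) - 1) (-1) (-1)) 0

-- ===== PORT B =====
-- Source B's return path: ones = one-positions, k = len(ones), any(friends_mask[:n-k]);
-- the subsequent in-place rebuild of the list does not affect the returned Bool.
def generate_next_mask_py_alt (friends_mask : List Int) : Bool :=
  let n : Int := friends_mask.length
  let ones : List Int := ((PySem.List.enumerate friends_mask).filter (fun p => p.2 ≠ 0)).map (fun p => p.1)
  let k : Int := ones.length
  (PySem.List.slice friends_mask none (some (n - k))).any (fun v => v != 0)

-- ===== PRECONDITION & SPEC =====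
def Spec_generate_next_mask_py (friends_mask : List Int) (out : Bool) : Prop := out = generate_next_mask_py_alt friends_mask
instance (friends_mask : List Int) (out : Bool) : Decidable (Spec_generate_next_mask_py friends_mask out) := by unfold Spec_generate_next_mask_py; infer_instance

-- ===== CLAIM (what is proved, stated in full; the proofs are below) =====
def Claim_equal_generate_next_mask_py : Prop := ∀ (friends_mask : List Int), Dom_generate_next_mask_py friends_mask → Spec_generate_next_mask_py friends_mask (generate_next_mask_py friends_mask)

-- ===== LEMMAS AND PROOFS =====

-- A's loop on the reversed list: d = (length - current index), c = counter.
def pvArev : List Int → Int → Int → Bool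
  | [], _, _ => false
  | v :: rest, d, c =>
    if v ≠ 0 then (if c + 1 < d then true else pvArev rest (d + 1) (c + 1))
    else pvArev rest (d + 1) c

-- "a zero strictly before a nonzero" (on the reversed mask)
def pvZb : List Int → Bool
  | [] => false
  | x :: xs => if x = 0 then xs.any (fun v => v != 0) else pvZb xs

-- "a nonzero strictly before a zero" (on the mask itself) — the common spec.
def pvH : List Int → Bool
  | [] => false
  | x :: xs => if x = 0 then pvH xs else xs.any (fun v => v == 0)

theorem pvArev_gap : ∀ (r : List Int) (d c : Int), c + 1 < d →
    pvArev r d c = r.any (fun v => v != 0) := by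
  intro r
  induction r with
  | nil => intro d c h; rfl
  | cons v rest ih =>
    intro d c h
    simp only [pvArev, List.any_cons]
    by_cases hv : v = 0
    · simp [hv, ih (d+1) c (by omega)]
    · simp [hv, h]

theorem pvArev_tight : ∀ (r : List Int) (d c : Int), c + 1 = d →
    pvArev r d c = pvZb r := by
  intro r
  induction r with
  | nil => intro d c h; rfl
  | cons v rest ih =>
    intro d c h
    simp only [pvArev, pvZb]
    by_cases hv : v = 0
    · simp [hv, pvArev_gap rest (d+1) c (by omega)]
    · have hnd : ¬ (c + 1 < d) := by omega
      simp [hv, hnd, ih (d+1) (c+1) (by omega)]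

theorem pvAloop_bridge (fm : List Int) : ∀ (m : Nat), m ≤ fm.length → ∀ (c : Int),
    pvAloop fm (PySem.List.pyRange ((m : Int) - 1) (-1) (-1)) c
      = pvArev ((fm.take m).reverse) ((fm.length : Int) - m + 1) c := by
  intro m
  induction m with
  | zero =>
    intro _ c
    rw [show ((0 : Nat) : Int) - 1 = -1 by norm_num,
      PySem.List.pyRange_neg_one_eq_nil le_rfl]
    rfl
  | succ m ih =>
    intro h c
    have hm : m < fm.length := by omega
    rw [show (((m + 1 : Nat)) : Int) - 1 = (m : Int) by push_cast; ring,
      PySem.List.pyRange_neg_one_cons (by omega : (-1 : Int) < (m : Int))]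
    have hget : PySem.List.pyGetD fm (m : Int) 0 = fm[m]'hm := by
      rw [PySem.List.pyGetD_eq_getElem]
      · simp
      · omega
      · exact_mod_cast hm
    have htake : (fm.take (m + 1)).reverse = fm[m]'hm :: (fm.take m).reverse := by
      rw [List.take_add_one, List.getElem?_eq_getElem hm]
      simp
    rw [htake]
    simp only [pvAloop, pvArev, hget]
    have hiff : ((m : Int) < (fm.length : Int) - (c + 1)) ↔ (c + 1 < (fm.length : Int) - ((m + 1 : Nat) : Int) + 1) := by
      push_cast; omega
    have hd : ((fm.length : Int) - ((m + 1 : Nat) : Int) + 1) + 1 = (fm.length : Int) - (m : Int) + 1 := by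
      push_cast; ring
    have hrng : ((m : Int)) - 1 = ((m : Nat) : Int) - 1 := rfl
    by_cases hv : fm[m]'hm = 0
    · simp only [hv, ne_eq, not_true_eq_false, if_false]
      rw [ih (by omega) c, hd]
    · rw [if_pos hv, if_pos hv]
      by_cases hcond : (m : Int) < (fm.length : Int) - (c + 1)
      · rw [if_pos hcond, if_pos (hiff.mp hcond)]
      · rw [if_neg hcond, if_neg (fun hh => hcond (hiff.mpr hh))]
        rw [ih (by omega) (c + 1), hd]

theorem pvZb_append (r : List Int) (x : Int) :
    pvZb (r ++ [x]) = (pvZb r || (decide (x ≠ 0) && r.any (fun v => v == 0))) := by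
  induction r with
  | nil => by_cases hx : x = 0 <;> simp [pvZb, hx]
  | cons y r' ih =>
    by_cases hy : y = 0
    · by_cases hx : x = 0 <;> simp [pvZb, hy, hx]
    · have hy' : (y == 0) = false := by simp [hy]
      simp [pvZb, hy, ih, hy']

theorem pvH_zero (xs : List Int) : pvH xs = true → xs.any (fun v => v == 0) = true := by
  induction xs with
  | nil => simp [pvH]
  | cons x xs ih =>
    intro h
    by_cases hx : x = 0
    · simp [hx]
    · simp only [pvH, if_neg hx] at h
      simp [h]

theorem pvZb_reverse (fm : List Int) : pvZb fm.reverse = pvH fm := by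
  induction fm with
  | nil => rfl
  | cons x fm' ih =>
    rw [List.reverse_cons, pvZb_append, ih]
    by_cases hx : x = 0
    · simp [pvH, hx]
    · have hd : decide (x ≠ 0) = true := by simp [hx]
      rw [hd, Bool.true_and, List.any_reverse]
      rw [show pvH (x :: fm') = fm'.any (fun v => v == 0) from by simp [pvH, hx]]
      cases hH : pvH fm'
      · rw [Bool.false_or]
      · rw [pvH_zero fm' hH, Bool.or_true]

theorem pvTake_any (fm : List Int) :
    (fm.take (fm.length - fm.countP (fun v => v != 0))).any (fun v => v != 0) = pvH fm := by
  induction fm with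
  | nil => rfl
  | cons x xs ih =>
    have hc : xs.countP (fun v => v != 0) ≤ xs.length := List.countP_le_length
    by_cases hx : x = 0
    · have hcnt : (x :: xs).countP (fun v => v != 0) = xs.countP (fun v => v != 0) := by
        simp [hx]
      have hlen : (x :: xs).length - (x :: xs).countP (fun v => v != 0)
          = (xs.length - xs.countP (fun v => v != 0)) + 1 := by
        rw [hcnt]; simp only [List.length_cons]; omega
      rw [hlen, List.take_succ_cons, List.any_cons]
      simp [pvH, hx, ih]
    · have hcnt : (x :: xs).countP (fun v => v != 0) = xs.countP (fun v => v != 0) + 1 := by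
        simp [hx]
      have hlen : (x :: xs).length - (x :: xs).countP (fun v => v != 0)
          = xs.length - xs.countP (fun v => v != 0) := by
        rw [hcnt]; simp only [List.length_cons]; omega
      rw [hlen]
      rw [show pvH (x :: xs) = xs.any (fun v => v == 0) from by simp [pvH, hx]]
      rcases Nat.eq_or_lt_of_le hc with heq | hlt
      · rw [heq, Nat.sub_self, List.take_zero, List.any_nil]
        have hall : ∀ v ∈ xs, (v != 0) = true := List.countP_eq_length.mp heq
        rw [eq_comm, List.any_eq_false]
        intro v hv
        have := hall v hv
        simp only [bne_iff_ne, ne_eq] at this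
        simp [this]
      · have h1 : xs.length - xs.countP (fun v => v != 0) = (xs.length - xs.countP (fun v => v != 0) - 1) + 1 := by omega
        rw [h1, List.take_succ_cons, List.any_cons]
        have hxt : (x != 0) = true := by simp [hx]
        rw [hxt, Bool.true_or, eq_comm]
        by_contra hany
        have hall : ∀ v ∈ xs, (v != 0) = true := by
          intro v hv
          rcases eq_or_ne v 0 with rfl | hv0
          · exact absurd (List.any_eq_true.mpr ⟨0, hv, by simp⟩) hany
          · simp [hv0]
        exact absurd (List.countP_eq_length.mpr hall) (by omega)
  

theorem pvOnes_length (fm : List Int) : ∀ (s : Int),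
    (((PySem.List.enumerate fm s).filter (fun p => p.2 ≠ 0)).map (fun p => p.1)).length
      = fm.countP (fun v => v != 0) := by
  induction fm with
  | nil => intro s; rfl
  | cons x xs ih =>
    intro s
    rw [PySem.List.enumerate_cons, List.filter_cons]
    by_cases hx : x = 0
    · rw [if_neg (by simp [hx])]
      rw [ih (s+1), List.countP_cons]
      simp [hx]
    · rw [if_pos (by simp [hx])]
      rw [List.map_cons, List.length_cons, ih (s+1), List.countP_cons]
      simp [hx]

theorem pvAlt_eq_H (fm : List Int) : generate_next_mask_py_alt fm = pvH fm := by
  show (PySem.List.slice fm none (some ((fm.length : Int) - ((((PySem.List.enumerate fm).filter (fun p => p.2 ≠ 0)).map (fun p => p.1)).length : Int)))).any (fun v => v != 0) = pvH fm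
  rw [pvOnes_length fm 0]
  have hc : fm.countP (fun v => v != 0) ≤ fm.length := List.countP_le_length
  rw [PySem.List.slice_to fm (by omega)]
  rw [show ((fm.length : Int) - (fm.countP (fun v => v != 0) : Int)).toNat
      = fm.length - fm.countP (fun v => v != 0) by omega]
  exact pvTake_any fm

theorem pvA_eq_H (fm : List Int) : generate_next_mask_py fm = pvH fm := by
  unfold generate_next_mask_py
  rw [pvAloop_bridge fm fm.length le_rfl 0, List.take_length, pvArev_tight _ _ _ (by omega),
    pvZb_reverse]

-- ===== VERDICT (by name: the statement is the Claim_ definition above) =====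
theorem generate_next_mask_py_spec : Claim_equal_generate_next_mask_py := by
  intro fm _
  unfold Spec_generate_next_mask_py
  rw [pvA_eq_H, pvAlt_eq_H]
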